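-- pv_equiv track=rewrite | github.com/kallenordg/logic_solver_py | saknade_rutor.py | solvable_grid
-- ===== SOURCE A (Python) =====
-- GRID_SIZE = 8
--
-- def can_place(grid, row, col, num):
--     for i in range(GRID_SIZE):
--         if grid[row][i] == num or grid[i][col] == num:
--             return False
--     return True
--
-- def solve_grid(grid, row, col):
--     if row == GRID_SIZE:
--         return True
--     if col == GRID_SIZE:
--         return solve_grid(grid, row + 1, 0)
--     if grid[row][col] != 0:
--         return solve_grid(grid, row, col + 1)
--     for i in range(1, GRID_SIZE + 1):
--         if can_place(grid, row, col, i):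
--             grid[row][col] = i
--             if solve_grid(grid, row, col + 1):
--                 return True
--             grid[row][col] = 0
--     return False
--
-- def solvable_grid(grid, row, col):
--     if row == GRID_SIZE:
--         return grid
--     if col == GRID_SIZE:
--         return solvable_grid(grid, row + 1, 0)
--     if grid[row][col] != 0:
--         return solvable_grid(grid, row, col + 1)
--     for i in range(1, GRID_SIZE + 1):
--         if can_place(grid, row, col, i):
--             grid[row][col] = i
--             if solve_grid(grid, row, col + 1):
--                 return grid
--             grid[row][col] = 0
--     return grid
-- ===== SOURCE B (Python) =====
-- GRID_SIZE = 8
--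
-- # B: instead of A's twin recursions that walk 2D coordinates (with row/column
-- # advance and skip branches) and rescan a row+column per candidate, B computes
-- # the agenda of empty cells once as a flat list, keeps per-row/per-column sets
-- # of used values, and runs a single Optional-returning recursion over that
-- # agenda, trying at each cell only the candidates the sets allow.  Return-value
-- # equivalent to A; unlike A it does not mutate the caller's grid.
--
-- def _search(g, rows, cols, cells):
--     if not cells:
--         return g
--     (r, c), rest = cells[0], cells[1:]
--     for num in [n for n in range(1, GRID_SIZE + 1)
--                 if n not in rows[r] and n not in cols[c]]:
--         g[r][c] = num
--         rows[r].add(num)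
--         cols[c].add(num)
--         res = _search(g, rows, cols, rest)
--         if res is not None:
--             return res
--         g[r][c] = 0
--         rows[r].discard(num)
--         cols[c].discard(num)
--     return None
--
-- def solvable_grid(grid, row, col):
--     if row == GRID_SIZE:
--         return grid
--     g = [list(r) for r in grid]
--     rows = [{v for v in r if v} for r in g]
--     cols = [{r[c] for r in g if r[c]} for c in range(GRID_SIZE)]
--     start = row * GRID_SIZE + col
--     cells = [(i // GRID_SIZE, i % GRID_SIZE)
--              for i in range(start, GRID_SIZE * GRID_SIZE)
--              if g[i // GRID_SIZE][i % GRID_SIZE] == 0]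
--     res = _search(g, rows, cols, cells)
--     return res if res is not None else grid
-- ===== Notes on version B (the rewrite author's own statement) =====
-- stated objective: faster
-- what changed: Replaces A's twin 2D-coordinate recursions (boolean solve_grid plus grid-returning solvable_grid, with row-advance/skip branches and an O(GRID_SIZE) row+column rescan per candidate) by a single Optional-returning recursion over a flat agenda of empty cells computed once up front, with per-row and per-column sets of used values so each cell tries only the candidates those sets allow; B does not mutate the caller's grid.
-- outside the precondition, e.g. on solvable_grid([[7, 0], [-1, 6]], 7, 8): A returns [[7, 0], [-1, 6]], B raises IndexError
import Mathlib
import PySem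

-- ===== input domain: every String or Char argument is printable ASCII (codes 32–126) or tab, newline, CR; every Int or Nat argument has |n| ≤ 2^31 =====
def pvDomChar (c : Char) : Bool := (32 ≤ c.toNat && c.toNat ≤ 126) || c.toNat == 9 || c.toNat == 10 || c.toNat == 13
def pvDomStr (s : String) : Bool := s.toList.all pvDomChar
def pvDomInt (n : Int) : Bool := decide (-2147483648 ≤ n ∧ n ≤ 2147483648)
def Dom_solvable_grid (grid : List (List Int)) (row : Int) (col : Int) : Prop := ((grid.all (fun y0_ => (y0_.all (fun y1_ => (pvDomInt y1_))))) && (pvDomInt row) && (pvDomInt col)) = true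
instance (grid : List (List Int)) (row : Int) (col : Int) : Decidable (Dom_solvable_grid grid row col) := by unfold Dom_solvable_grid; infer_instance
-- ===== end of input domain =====

-- B replaces A's twin 2D-coordinate recursions (boolean solve_grid + grid-returning solvable_grid,
-- with row-advance/skip branches and a row+column rescan per candidate) by a single Optional-returning
-- recursion over a flat agenda of empty cells computed once, with maintained per-row/per-column sets of
-- used values; equivalence is about the RETURN value only (Python A mutates its grid argument in place,
-- Python B works on a copy).

-- ===== PORT A =====
-- shared cell read/write helpers (both ports index the grid the same way);
-- pyGetD/pySetD are total forms: out-of-range reads/writes (Python IndexError) are excluded by Pre_.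
def pvCell (g : List (List Int)) (r c : Int) : Int :=
  PySem.List.pyGetD (PySem.List.pyGetD g r []) c 0

def pvSetCell (g : List (List Int)) (r c : Int) (v : Int) : List (List Int) :=
  PySem.List.pySetD g r (PySem.List.pySetD (PySem.List.pyGetD g r []) c v)

-- can_place(grid, row, col, num): the early-return-False loop is the List.all over range(GRID_SIZE)
def can_place (g : List (List Int)) (row col num : Int) : Bool :=
  (PySem.List.pyRange 0 8).all (fun i => !(pvCell g row i == num || pvCell g i col == num))

-- solve_grid: the Python mutates grid and returns a bool, so the port threads the grid state and
-- returns (bool, grid).  fuel is only a totality device; 200 exceeds the recursion depth (≤ 81)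
-- reachable from any input admitted by Pre_.
mutual
def solveA : Nat → List (List Int) → Int → Int → Bool × List (List Int)
  | 0, g, _, _ => (false, g)
  | fuel+1, g, row, col =>
    if row == 8 then (true, g)
    else if col == 8 then solveA fuel g (row+1) 0
    else if pvCell g row col != 0 then solveA fuel g row (col+1)
    else loopA fuel g row col (PySem.List.pyRange 1 9)
  termination_by fuel _ _ _ => (fuel, 0)

def loopA : Nat → List (List Int) → Int → Int → List Int → Bool × List (List Int)
  | _, g, _, _, [] => (false, g)
  | fuel, g, row, col, num :: rest =>
    if can_place g row col num then
      let r := solveA fuel (pvSetCell g row col num) row (col+1)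
      if r.1 then (true, r.2)
      else loopA fuel (pvSetCell r.2 row col 0) row col rest
    else loopA fuel g row col rest
  termination_by fuel _ _ _ cand => (fuel, cand.length + 1)
end

-- solvable_grid: same recursion as solve_grid but always returns the grid state
mutual
def solvGA : Nat → List (List Int) → Int → Int → List (List Int)
  | 0, g, _, _ => g
  | fuel+1, g, row, col =>
    if row == 8 then g
    else if col == 8 then solvGA fuel g (row+1) 0
    else if pvCell g row col != 0 then solvGA fuel g row (col+1)
    else loopGA fuel g row col (PySem.List.pyRange 1 9)
  termination_by fuel _ _ _ => (fuel, 0)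

def loopGA : Nat → List (List Int) → Int → Int → List Int → List (List Int)
  | _, g, _, _, [] => g
  | fuel, g, row, col, num :: rest =>
    if can_place g row col num then
      let r := solveA fuel (pvSetCell g row col num) row (col+1)
      if r.1 then r.2
      else loopGA fuel (pvSetCell r.2 row col 0) row col rest
    else loopGA fuel g row col rest
  termination_by fuel _ _ _ cand => (fuel, cand.length + 1)
end

def solvable_grid (grid : List (List Int)) (row : Int) (col : Int) : List (List Int) :=
  solvGA 200 grid row col

-- ===== PORT B =====
-- rows = [{v for v in r if v} for r in g]
def pvRowSets (g : List (List Int)) : List (PySem.Set Int) :=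
  g.map (fun r => PySem.Set.ofList (r.filter (fun v => v != 0)))

-- cols = [{r[c] for r in g if r[c]} for c in range(GRID_SIZE)]
def pvColSets (g : List (List Int)) : List (PySem.Set Int) :=
  (PySem.List.pyRange 0 8).map (fun c =>
    PySem.Set.ofList ((g.map (fun r => PySem.List.pyGetD r c 0)).filter (fun v => v != 0)))

-- _search: recursion over the agenda of empty cells; at each cell the candidate list is the
-- comprehension [n for n in 1..8 if n not in rows[r] and n not in cols[c]] (the filter below), and
-- the for-loop over it is loopB.  On backtracking the Python adds num to and then discards it from
-- rows[r] / cols[c]; since the comprehension guaranteed num was absent, add-then-discard restores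
-- the sets exactly, so the port passes the ORIGINAL rows/cols to the continuation.
mutual
def searchB (g : List (List Int)) (rows cols : List (PySem.Set Int)) (cells : List (Int × Int)) :
    Option (List (List Int)) :=
  match cells with
  | [] => some g
  | (r, c) :: rest =>
    loopB g rows cols r c rest ((PySem.List.pyRange 1 9).filter (fun n =>
      !(PySem.Set.contains (PySem.List.pyGetD rows r PySem.Set.empty) n)
        && !(PySem.Set.contains (PySem.List.pyGetD cols c PySem.Set.empty) n)))
  termination_by (cells.length, 0)

def loopB (g : List (List Int)) (rows cols : List (PySem.Set Int)) (r c : Int)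
    (rest : List (Int × Int)) (nums : List Int) : Option (List (List Int)) :=
  match nums with
  | [] => none
  | num :: nums' =>
    let g1 := pvSetCell g r c num
    let rows1 := PySem.List.pySetD rows r (PySem.Set.add (PySem.List.pyGetD rows r PySem.Set.empty) num)
    let cols1 := PySem.List.pySetD cols c (PySem.Set.add (PySem.List.pyGetD cols c PySem.Set.empty) num)
    match searchB g1 rows1 cols1 rest with
    | some res => some res
    | none => loopB (pvSetCell g1 r c 0) rows cols r c rest nums'
  termination_by (rest.length, nums.length + 1)
end

-- cells = [(i//8, i%8) for i in range(start, 64) if g[i//8][i%8] == 0]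
def solvable_grid_alt (grid : List (List Int)) (row : Int) (col : Int) : List (List Int) :=
  if row == 8 then grid
  else
    let start := row * 8 + col
    let cells := ((PySem.List.pyRange start 64).filter (fun i =>
        pvCell grid (PySem.Int.floordiv i 8) (PySem.Int.mod i 8) == 0)).map
      (fun i => (PySem.Int.floordiv i 8, PySem.Int.mod i 8))
    match searchB grid (pvRowSets grid) (pvColSets grid) cells with
    | some res => res
    | none => grid

-- ===== PRECONDITION & SPEC =====
-- Pre_ excludes inputs on which A raises IndexError / RecursionError (grid not exactly 8×8 while
-- row ≠ 8, or a start index outside 0..8) together with the accidental-return corners of the same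
-- unchecked indexing (negative-index wraparound; rows longer than 8, whose surplus cells A's
-- fixed-range scans silently ignore).
def Pre_solvable_grid (grid : List (List Int)) (row : Int) (col : Int) : Prop :=
  row = 8 ∨ (grid.length = 8 ∧ (∀ r ∈ grid, r.length = 8) ∧ 0 ≤ row ∧ row < 8 ∧ 0 ≤ col ∧ col ≤ 8)
instance (grid : List (List Int)) (row : Int) (col : Int) : Decidable (Pre_solvable_grid grid row col) := by unfold Pre_solvable_grid; infer_instance

def pvWitness_solvable_grid : List (List Int) × Int × Int :=
  ([[0,0,0,0,0,0,0,0],[0,0,0,0,0,0,0,0],[0,0,0,0,0,0,0,0],[0,0,0,0,0,0,0,0],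
    [0,0,0,0,0,0,0,0],[0,0,0,0,0,0,0,0],[0,0,0,0,0,0,0,0],[0,0,0,0,0,0,0,0]], 0, 0)

def Spec_solvable_grid (grid : List (List Int)) (row : Int) (col : Int) (out : List (List Int)) : Prop := out = solvable_grid_alt grid row col
instance (grid : List (List Int)) (row : Int) (col : Int) (out : List (List Int)) : Decidable (Spec_solvable_grid grid row col out) := by unfold Spec_solvable_grid; infer_instance

-- ===== CLAIM (what is proved, stated in full; the proofs are below) =====
def Claim_equal_solvable_grid : Prop := ∀ (grid : List (List Int)) (row : Int) (col : Int), Dom_solvable_grid grid row col → Pre_solvable_grid grid row col → Spec_solvable_grid grid row col (solvable_grid grid row col)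

-- ===== LEMMAS AND PROOFS =====

-- an 8×8 grid
def ShapeG (g : List (List Int)) : Prop := g.length = 8 ∧ ∀ r ∈ g, r.length = 8

-- rows[rn] is exactly the set of nonzero values present in row rn of g
def RowsOK (g : List (List Int)) (rows : List (PySem.Set Int)) : Prop :=
  rows.length = 8 ∧ ∀ rn : Nat, rn < 8 → ∀ v : Int,
    (v ∈ rows.getD rn [] ↔ v ≠ 0 ∧ ∃ cn : Nat, cn < 8 ∧ pvCell g rn cn = v)

def ColsOK (g : List (List Int)) (cols : List (PySem.Set Int)) : Prop :=
  cols.length = 8 ∧ ∀ cn : Nat, cn < 8 → ∀ v : Int,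
    (v ∈ cols.getD cn [] ↔ v ≠ 0 ∧ ∃ rn : Nat, rn < 8 ∧ pvCell g rn cn = v)

lemma pvCell_eq_getD (g : List (List Int)) {r c : Int} (hr : 0 ≤ r) (hc : 0 ≤ c) :
    pvCell g r c = (g.getD r.toNat []).getD c.toNat 0 := by
  simp [pvCell, PySem.List.pyGetD_of_nonneg _ _ hr, PySem.List.pyGetD_of_nonneg _ _ hc]

lemma pvSetCell_eq (g : List (List Int)) {r c : Int} (v : Int) (hr : 0 ≤ r) (hc : 0 ≤ c) :
    pvSetCell g r c v = g.set r.toNat ((g.getD r.toNat []).set c.toNat v) := by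
  simp [pvSetCell, PySem.List.pySetD_of_nonneg _ _ hr, PySem.List.pySetD_of_nonneg _ _ hc,
    PySem.List.pyGetD_of_nonneg _ _ hr]

lemma getD_mem_of_lt (g : List (List Int)) {n : Nat} (h : n < g.length) :
    g.getD n [] ∈ g := by
  rw [List.getD_eq_getElem g [] h]; exact List.getElem_mem h

lemma getD_set_eq (g : List (List Int)) (x : List Int) {i j : Nat} (hi : i < g.length) :
    (g.set i x).getD j [] = if j = i then x else g.getD j [] := by
  by_cases h : i = j
  · subst h; simp [List.getD_eq_getElem?_getD, hi]
  · have h' : j ≠ i := fun hh => h hh.symm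
    simp [List.getD_eq_getElem?_getD, h, h']

lemma shape_set (g : List (List Int)) {row col : Int} (v : Int) (hg : ShapeG g)
    (hr : 0 ≤ row ∧ row < 8) (hc : 0 ≤ col ∧ col < 8) : ShapeG (pvSetCell g row col v) := by
  obtain ⟨hlen, hrows⟩ := hg
  have hrn : row.toNat < g.length := by omega
  rw [pvSetCell_eq g v hr.1 hc.1]
  refine ⟨by simp [hlen], ?_⟩
  intro r hrmem
  rcases List.mem_or_eq_of_mem_set hrmem with h | h
  · exact hrows r h
  · subst h
    rw [List.length_set]
    exact hrows _ (getD_mem_of_lt g hrn)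

lemma cell_set (g : List (List Int)) {row col : Int} (v : Int) (hg : ShapeG g)
    (hrow : 0 ≤ row ∧ row < 8) (hcol : 0 ≤ col ∧ col < 8)
    {r c : Int} (hr : 0 ≤ r ∧ r < 8) (hc : 0 ≤ c ∧ c < 8) :
    pvCell (pvSetCell g row col v) r c = if r = row ∧ c = col then v else pvCell g r c := by
  obtain ⟨hlen, hrows⟩ := hg
  have hrn : row.toNat < g.length := by omega
  have hcn : col.toNat < (g.getD row.toNat []).length := by
    rw [hrows _ (getD_mem_of_lt g hrn)]; omega
  rw [pvSetCell_eq g v hrow.1 hcol.1, pvCell_eq_getD _ hr.1 hc.1,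
    pvCell_eq_getD _ hr.1 hc.1, getD_set_eq g _ hrn]
  by_cases h1 : r = row
  · rw [if_pos (show r.toNat = row.toNat by omega), List.getD_eq_getElem?_getD, List.getElem?_set]
    by_cases h2 : c = col
    · rw [if_pos (show col.toNat = c.toNat by omega), if_pos hcn]
      simp [h1, h2]
    · rw [if_neg (show ¬ col.toNat = c.toNat by omega)]
      have hrr : r.toNat = row.toNat := by omega
      simp [h1, h2, List.getD_eq_getElem?_getD]
  · rw [if_neg (show ¬ r.toNat = row.toNat by omega)]
    simp [h1]

lemma setCell_setCell (g : List (List Int)) {row col : Int} (v w : Int)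
    (hr : 0 ≤ row) (hc : 0 ≤ col) (hg : ShapeG g) (hrow : row < 8) :
    pvSetCell (pvSetCell g row col v) row col w = pvSetCell g row col w := by
  obtain ⟨hlen, hrows⟩ := hg
  have hrn : row.toNat < g.length := by omega
  rw [pvSetCell_eq g v hr hc, pvSetCell_eq _ w hr hc, pvSetCell_eq g w hr hc,
    getD_set_eq g _ hrn, if_pos rfl, List.set_set, List.set_set]

lemma setCell_self (g : List (List Int)) {row col : Int} (hg : ShapeG g)
    (hrow : 0 ≤ row ∧ row < 8) (hcol : 0 ≤ col ∧ col < 8) :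
    pvSetCell g row col (pvCell g row col) = g := by
  obtain ⟨hlen, hrows⟩ := hg
  have hrn : row.toNat < g.length := by omega
  have hcn : col.toNat < (g.getD row.toNat []).length := by
    rw [hrows _ (getD_mem_of_lt g hrn)]; omega
  rw [pvSetCell_eq g _ hrow.1 hcol.1, pvCell_eq_getD g hrow.1 hcol.1,
    List.getD_eq_getElem _ _ hcn, List.set_getElem_self, List.getD_eq_getElem _ _ hrn,
    List.set_getElem_self]

lemma pvCell_natCast (g : List (List Int)) (rn cn : Nat) :
    pvCell g rn cn = (g.getD rn []).getD cn 0 := by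
  rw [pvCell_eq_getD g (Int.natCast_nonneg rn) (Int.natCast_nonneg cn)]; simp

lemma rowsOK_init (g : List (List Int)) (hg : ShapeG g) : RowsOK g (pvRowSets g) := by
  obtain ⟨hlen, hrows⟩ := hg
  refine ⟨by simp [pvRowSets, hlen], ?_⟩
  intro rn hrn v
  have hlt : rn < g.length := by omega
  have hrowlen : (g.getD rn []).length = 8 := hrows _ (getD_mem_of_lt g hlt)
  have hmap : (pvRowSets g).getD rn [] =
      PySem.Set.ofList ((g.getD rn []).filter (fun v => v != 0)) := by
    rw [pvRowSets, List.getD_eq_getElem _ _ (by simpa using hlt), List.getElem_map,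
      List.getD_eq_getElem _ _ hlt]
  rw [hmap, PySem.Set.mem_ofList]
  simp only [List.mem_filter, bne_iff_ne, ne_eq]
  constructor
  · rintro ⟨hmem, hv⟩
    obtain ⟨cn, hcn, hcv⟩ := List.mem_iff_getElem.mp hmem
    refine ⟨hv, cn, by omega, ?_⟩
    rw [pvCell_natCast, List.getD_eq_getElem _ _ hcn, hcv]
  · rintro ⟨hv, cn, hcn, hcv⟩
    have hcn' : cn < (g.getD rn []).length := by omega
    rw [pvCell_natCast, List.getD_eq_getElem _ _ hcn'] at hcv
    exact ⟨List.mem_iff_getElem.mpr ⟨cn, hcn', hcv⟩, hv⟩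

lemma colsOK_init (g : List (List Int)) (hg : ShapeG g) : ColsOK g (pvColSets g) := by
  obtain ⟨hlen, hrows⟩ := hg
  refine ⟨by simp [pvColSets, PySem.List.length_pyRange_one], ?_⟩
  intro cn hcn v
  have hlt : cn < (PySem.List.pyRange 0 8).length := by
    rw [PySem.List.length_pyRange_one]; omega
  have hmap : (pvColSets g).getD cn [] =
      PySem.Set.ofList ((g.map (fun r => PySem.List.pyGetD r ((cn : Nat) : Int) 0)).filter
        (fun v => v != 0)) := by
    rw [pvColSets, List.getD_eq_getElem _ _ (by simpa using hlt), List.getElem_map,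
      PySem.List.getElem_pyRange_one]
    norm_num
  rw [hmap, PySem.Set.mem_ofList]
  simp only [List.mem_filter, List.mem_map, bne_iff_ne, ne_eq, PySem.List.pyGetD_natCast]
  constructor
  · rintro ⟨⟨rrow, hrmem, hrv⟩, hv⟩
    obtain ⟨rn, hrn, hrr⟩ := List.mem_iff_getElem.mp hrmem
    refine ⟨hv, rn, by omega, ?_⟩
    rw [pvCell_natCast, List.getD_eq_getElem _ _ hrn, hrr, hrv]
  · rintro ⟨hv, rn, hrn, hrv⟩
    have hrn' : rn < g.length := by omega
    rw [pvCell_natCast, List.getD_eq_getElem _ _ hrn'] at hrv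
    exact ⟨⟨g[rn], List.getElem_mem hrn', hrv⟩, hv⟩

lemma rowsOK_update (g : List (List Int)) (rows : List (PySem.Set Int)) {row col num : Int}
    (hg : ShapeG g) (h : RowsOK g rows) (hrow : 0 ≤ row ∧ row < 8) (hcol : 0 ≤ col ∧ col < 8)
    (hnum : num ≠ 0) (hzero : pvCell g row col = 0) :
    RowsOK (pvSetCell g row col num)
      (PySem.List.pySetD rows row (PySem.Set.add (PySem.List.pyGetD rows row PySem.Set.empty) num)) := by
  obtain ⟨hrlen, hmem⟩ := h
  have hrown : row.toNat < rows.length := by omega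
  have hget : PySem.List.pyGetD rows row PySem.Set.empty = rows.getD row.toNat [] := by
    rw [PySem.List.pyGetD_of_nonneg _ _ hrow.1]; rfl
  refine ⟨by rw [PySem.List.length_pySetD]; omega, ?_⟩
  intro rn hrn v
  rw [PySem.List.pySetD_of_nonneg _ _ hrow.1, getD_set_eq _ _ hrown, hget]
  by_cases h1 : rn = row.toNat
  · rw [if_pos h1, PySem.Set.mem_add]
    have hcast : ((rn : Nat) : Int) = row := by omega
    constructor
    · rintro (hv | hv)
      · obtain ⟨hv0, cn, hcn, hcv⟩ := (hmem rn hrn v).mp (h1 ▸ hv)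
        refine ⟨hv0, cn, hcn, ?_⟩
        rw [cell_set g num hg hrow hcol (by omega) (by omega)]
        rw [hcast] at hcv ⊢
        by_cases h2 : ((cn : Nat) : Int) = col
        · exfalso; rw [h2, hzero] at hcv; exact hv0 hcv.symm
        · rw [if_neg (by tauto)]; exact hcv
      · refine ⟨hv ▸ hnum, col.toNat, by omega, ?_⟩
        rw [cell_set g num hg hrow hcol (by omega) (by omega),
          if_pos ⟨by omega, by omega⟩]
        exact hv.symm
    · rintro ⟨hv0, cn, hcn, hcv⟩
      rw [cell_set g num hg hrow hcol (by omega) (by omega)] at hcv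
      by_cases h2 : ((rn : Nat) : Int) = row ∧ ((cn : Nat) : Int) = col
      · rw [if_pos h2] at hcv
        exact Or.inr hcv.symm
      · rw [if_neg h2] at hcv
        left; rw [← h1]
        exact (hmem rn hrn v).mpr ⟨hv0, cn, hcn, hcv⟩
  · rw [if_neg h1]
    have : ∀ cn : Nat, cn < 8 → pvCell (pvSetCell g row col num) rn cn = pvCell g rn cn := by
      intro cn hcn
      rw [cell_set g num hg hrow hcol (by omega) (by omega), if_neg (by
        rintro ⟨ha, -⟩; omega)]
    constructor
    · intro hv
      obtain ⟨hv0, cn, hcn, hcv⟩ := (hmem rn hrn v).mp hv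
      exact ⟨hv0, cn, hcn, by rw [this cn hcn]; exact hcv⟩
    · rintro ⟨hv0, cn, hcn, hcv⟩
      rw [this cn hcn] at hcv
      exact (hmem rn hrn v).mpr ⟨hv0, cn, hcn, hcv⟩

lemma colsOK_update (g : List (List Int)) (cols : List (PySem.Set Int)) {row col num : Int}
    (hg : ShapeG g) (h : ColsOK g cols) (hrow : 0 ≤ row ∧ row < 8) (hcol : 0 ≤ col ∧ col < 8)
    (hnum : num ≠ 0) (hzero : pvCell g row col = 0) :
    ColsOK (pvSetCell g row col num)
      (PySem.List.pySetD cols col (PySem.Set.add (PySem.List.pyGetD cols col PySem.Set.empty) num)) := by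
  obtain ⟨hclen, hmem⟩ := h
  have hcoln : col.toNat < cols.length := by omega
  have hget : PySem.List.pyGetD cols col PySem.Set.empty = cols.getD col.toNat [] := by
    rw [PySem.List.pyGetD_of_nonneg _ _ hcol.1]; rfl
  refine ⟨by rw [PySem.List.length_pySetD]; omega, ?_⟩
  intro cn hcn v
  rw [PySem.List.pySetD_of_nonneg _ _ hcol.1, getD_set_eq _ _ hcoln, hget]
  by_cases h1 : cn = col.toNat
  · rw [if_pos h1, PySem.Set.mem_add]
    have hcast : ((cn : Nat) : Int) = col := by omega
    constructor
    · rintro (hv | hv)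
      · obtain ⟨hv0, rn, hrn, hcv⟩ := (hmem cn hcn v).mp (h1 ▸ hv)
        refine ⟨hv0, rn, hrn, ?_⟩
        rw [cell_set g num hg hrow hcol (by omega) (by omega)]
        rw [hcast] at hcv ⊢
        by_cases h2 : ((rn : Nat) : Int) = row
        · exfalso; rw [h2, hzero] at hcv; exact hv0 hcv.symm
        · rw [if_neg (by tauto)]; exact hcv
      · refine ⟨hv ▸ hnum, row.toNat, by omega, ?_⟩
        rw [cell_set g num hg hrow hcol (by omega) (by omega),
          if_pos ⟨by omega, by omega⟩]
        exact hv.symm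
    · rintro ⟨hv0, rn, hrn, hcv⟩
      rw [cell_set g num hg hrow hcol (by omega) (by omega)] at hcv
      by_cases h2 : ((rn : Nat) : Int) = row ∧ ((cn : Nat) : Int) = col
      · rw [if_pos h2] at hcv
        exact Or.inr hcv.symm
      · rw [if_neg h2] at hcv
        left; rw [← h1]
        exact (hmem cn hcn v).mpr ⟨hv0, rn, hrn, hcv⟩
  · rw [if_neg h1]
    have hsame : ∀ rn : Nat, rn < 8 → pvCell (pvSetCell g row col num) rn cn = pvCell g rn cn := by
      intro rn hrn
      rw [cell_set g num hg hrow hcol (by omega) (by omega), if_neg (by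
        rintro ⟨-, hb⟩; omega)]
    constructor
    · intro hv
      obtain ⟨hv0, rn, hrn, hcv⟩ := (hmem cn hcn v).mp hv
      exact ⟨hv0, rn, hrn, by rw [hsame rn hrn]; exact hcv⟩
    · rintro ⟨hv0, rn, hrn, hcv⟩
      rw [hsame rn hrn] at hcv
      exact (hmem cn hcn v).mpr ⟨hv0, rn, hrn, hcv⟩

lemma can_place_iff (g : List (List Int)) (rows cols : List (PySem.Set Int)) {row col num : Int}
    (hrows : RowsOK g rows) (hcols : ColsOK g cols)
    (hrow : 0 ≤ row ∧ row < 8) (hcol : 0 ≤ col ∧ col < 8) (hnum : num ≠ 0) :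
    can_place g row col num =
      (!(PySem.Set.contains (PySem.List.pyGetD rows row PySem.Set.empty) num)
        && !(PySem.Set.contains (PySem.List.pyGetD cols col PySem.Set.empty) num)) := by
  have hgr : PySem.List.pyGetD rows row PySem.Set.empty = rows.getD row.toNat [] := by
    rw [PySem.List.pyGetD_of_nonneg _ _ hrow.1]; rfl
  have hgc : PySem.List.pyGetD cols col PySem.Set.empty = cols.getD col.toNat [] := by
    rw [PySem.List.pyGetD_of_nonneg _ _ hcol.1]; rfl
  have hrmem : num ∈ rows.getD row.toNat [] ↔ ∃ cn : Nat, cn < 8 ∧ pvCell g row cn = num := by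
    rw [hrows.2 row.toNat (by omega) num]
    have : ((row.toNat : Nat) : Int) = row := by omega
    rw [this]
    exact ⟨fun h => h.2, fun h => ⟨hnum, h⟩⟩
  have hcmem : num ∈ cols.getD col.toNat [] ↔ ∃ rn : Nat, rn < 8 ∧ pvCell g rn col = num := by
    rw [hcols.2 col.toNat (by omega) num]
    have : ((col.toNat : Nat) : Int) = col := by omega
    rw [this]
    exact ⟨fun h => h.2, fun h => ⟨hnum, h⟩⟩
  rw [hgr, hgc, Bool.eq_iff_iff]
  simp only [can_place, List.all_eq_true, PySem.List.mem_pyRange_one, Bool.and_eq_true,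
    Bool.not_eq_true', Bool.or_eq_false_iff, beq_eq_false_iff_ne, ne_eq,
    PySem.Set.contains, List.contains_eq_mem, decide_eq_false_iff_not]
  constructor
  · intro hall
    constructor
    · intro hin
      obtain ⟨cn, hcn, hcv⟩ := hrmem.mp hin
      exact (hall (cn : Int) ⟨by omega, by omega⟩).1 hcv
    · intro hin
      obtain ⟨rn, hrn, hcv⟩ := hcmem.mp hin
      exact (hall (rn : Int) ⟨by omega, by omega⟩).2 hcv
  · rintro ⟨hr, hc⟩ i ⟨hi0, hi8⟩
    have hicast : ((i.toNat : Nat) : Int) = i := by omega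
    constructor
    · intro heq
      exact hr (hrmem.mpr ⟨i.toNat, by omega, by rw [hicast]; exact heq⟩)
    · intro heq
      exact hc (hcmem.mpr ⟨i.toNat, by omega, by rw [hicast]; exact heq⟩)

-- the agenda of empty cells of g at linear indices i, i+1, …, i+n-1 (proof-side mirror of B's
-- range-filter-map comprehension, recursing on the count n so that simp can unfold it)
def eCells (g : List (List Int)) : Nat → Nat → List (Int × Int)
  | 0, _ => []
  | n+1, i =>
    if pvCell g ((i / 8 : Nat) : Int) ((i % 8 : Nat) : Int) = 0 then
      (((i / 8 : Nat) : Int), ((i % 8 : Nat) : Int)) :: eCells g n (i+1)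
    else eCells g n (i+1)

lemma floordiv_nat (i : Nat) : PySem.Int.floordiv (i : Int) 8 = ((i / 8 : Nat) : Int) := by
  exact_mod_cast PySem.Int.floordiv_natCast i 8

lemma mod_nat (i : Nat) : PySem.Int.mod (i : Int) 8 = ((i % 8 : Nat) : Int) := by
  exact_mod_cast PySem.Int.mod_natCast i 8

-- B's comprehension equals the proof-side agenda
lemma cells_eq (g : List (List Int)) : ∀ (n i : Nat), n + i = 64 →
    ((PySem.List.pyRange (i : Int) 64).filter (fun j =>
        pvCell g (PySem.Int.floordiv j 8) (PySem.Int.mod j 8) == 0)).map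
      (fun j => (PySem.Int.floordiv j 8, PySem.Int.mod j 8)) = eCells g n i := by
  intro n
  induction n with
  | zero =>
    intro i hi
    rw [PySem.List.pyRange_one_eq_nil (by omega)]
    simp [eCells]
  | succ m ih =>
    intro i hi
    rw [PySem.List.pyRange_one_cons (by omega : (i : Int) < 64)]
    have hcast : ((i : Int) + 1) = ((i + 1 : Nat) : Int) := by push_cast; ring
    rw [List.filter_cons, hcast]
    simp only [eCells]
    by_cases h : pvCell g ((i / 8 : Nat) : Int) ((i % 8 : Nat) : Int) = 0
    · rw [if_pos (by rw [floordiv_nat, mod_nat]; exact beq_iff_eq.mpr h), if_pos h,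
        List.map_cons, floordiv_nat, mod_nat, ih (i+1) (by omega)]
    · rw [if_neg (by rw [floordiv_nat, mod_nat]; simpa using h), if_neg h, ih (i+1) (by omega)]

-- writing a cell at linear index < i does not change the agenda from i on
lemma eCells_set (g : List (List Int)) {row col : Int} (v : Int) (hg : ShapeG g)
    (hrow : 0 ≤ row ∧ row < 8) (hcol : 0 ≤ col ∧ col < 8) :
    ∀ (n i : Nat), n + i ≤ 64 → (row * 8 + col).toNat < i →
    eCells (pvSetCell g row col v) n i = eCells g n i := by
  intro n
  induction n with
  | zero => intro i _ _; simp [eCells]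
  | succ m ih =>
    intro i hle hlt
    have hi8 : i / 8 < 8 := by omega
    have hcell : pvCell (pvSetCell g row col v) ((i / 8 : Nat) : Int) ((i % 8 : Nat) : Int)
        = pvCell g ((i / 8 : Nat) : Int) ((i % 8 : Nat) : Int) := by
      rw [cell_set g v hg hrow hcol (by constructor <;> omega) (by constructor <;> omega),
        if_neg (by rintro ⟨ha, hb⟩; omega)]
    simp only [eCells, hcell]
    by_cases h : pvCell g ((i / 8 : Nat) : Int) ((i % 8 : Nat) : Int) = 0
    · rw [if_pos h, if_pos h, ih (i+1) (by omega) (by omega)]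
    · rw [if_neg h, if_neg h, ih (i+1) (by omega) (by omega)]

-- the statement proved by induction on fuel: B's agenda recursion equals A's solver (the success
-- value, and the restored grid on failure), under the row/column-set invariants
def SolveEq (fuel : Nat) : Prop :=
  ∀ (g : List (List Int)) (rows cols : List (PySem.Set Int)) (row col : Int),
    ShapeG g → RowsOK g rows → ColsOK g cols →
    0 ≤ row → row ≤ 8 → 0 ≤ col → col ≤ 8 → row * 8 + col ≤ 64 →
    ((64 - (row * 8 + col)) + (8 - row)).toNat < fuel →
    (searchB g rows cols (eCells g (64 - (row * 8 + col).toNat) (row * 8 + col).toNat) =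
      (if (solveA fuel g row col).1 then some (solveA fuel g row col).2 else none))
    ∧ ((solveA fuel g row col).1 = false → (solveA fuel g row col).2 = g)

-- the inner candidate loop: A's for-loop with can_place vs B's loop over the filtered candidates
lemma loopEq (f : Nat) (ih : SolveEq f) (rows cols : List (PySem.Set Int)) (row col : Int)
    (cand : List Int) :
    ∀ (g : List (List Int)),
    ShapeG g → RowsOK g rows → ColsOK g cols →
    0 ≤ row → row < 8 → 0 ≤ col → col < 8 → pvCell g row col = 0 →
    (∀ num ∈ cand, num ≠ 0) →
    ((64 - (row * 8 + col + 1)) + (8 - row)).toNat < f →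
    (loopB g rows cols row col (eCells g (64 - (row * 8 + col).toNat - 1) ((row * 8 + col).toNat + 1))
        (cand.filter (fun n =>
          !(PySem.Set.contains (PySem.List.pyGetD rows row PySem.Set.empty) n)
            && !(PySem.Set.contains (PySem.List.pyGetD cols col PySem.Set.empty) n)))
      = (if (loopA f g row col cand).1 then some (loopA f g row col cand).2 else none))
    ∧ ((loopA f g row col cand).1 = false → (loopA f g row col cand).2 = g) := by
  induction cand with
  | nil =>
    intro g _ _ _ _ _ _ _ _ _ _
    exact ⟨by simp [loopB, loopA], by simp [loopA]⟩
  | cons num rest ihc =>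
    intro g hg hrows hcols h0r h8r h0c h8c hzero hnums hf
    have hnum : num ≠ 0 := hnums num (by simp)
    have hrest : ∀ n ∈ rest, n ≠ 0 := fun n hn => hnums n (by simp [hn])
    have hbridge := can_place_iff g rows cols hrows hcols ⟨h0r, h8r⟩ ⟨h0c, h8c⟩ hnum
    rw [List.filter_cons]
    simp only [loopA]
    by_cases hcp : can_place g row col num = true
    · rw [if_pos hcp, if_pos (by rw [← hbridge]; exact hcp)]
      simp only [loopB]
      have hg1shape : ShapeG (pvSetCell g row col num) :=
        shape_set g num hg ⟨h0r, h8r⟩ ⟨h0c, h8c⟩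
      have hrows1 := rowsOK_update g rows hg hrows ⟨h0r, h8r⟩ ⟨h0c, h8c⟩ hnum hzero
      have hcols1 := colsOK_update g cols hg hcols ⟨h0r, h8r⟩ ⟨h0c, h8c⟩ hnum hzero
      have hcells : eCells g (64 - (row * 8 + col).toNat - 1) ((row * 8 + col).toNat + 1)
          = eCells (pvSetCell g row col num) (64 - (row * 8 + col).toNat - 1)
              ((row * 8 + col).toNat + 1) := by
        rw [eCells_set g num hg ⟨h0r, h8r⟩ ⟨h0c, h8c⟩ _ _ (by omega) (by omega)]
      have hmain := ih (pvSetCell g row col num) _ _ row (col+1) hg1shape hrows1 hcols1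
        h0r (by omega) (by omega) (by omega) (by nlinarith) (by omega)
      rw [show (row * 8 + (col + 1)).toNat = (row * 8 + col).toNat + 1 by omega,
        show 64 - ((row * 8 + col).toNat + 1) = 64 - (row * 8 + col).toNat - 1 by omega] at hmain
      by_cases hr1 : (solveA f (pvSetCell g row col num) row (col+1)).1 = true
      · rw [hcells, hmain.1, if_pos hr1]
        exact ⟨by simp [hr1], by simp [hr1]⟩
      · have hr1' : (solveA f (pvSetCell g row col num) row (col+1)).1 = false := by
          simpa using hr1
        have hr2 := hmain.2 hr1'
        have hrestore : pvSetCell (pvSetCell g row col num) row col 0 = g := by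
          rw [setCell_setCell g num 0 h0r h0c hg h8r, ← hzero,
            setCell_self g hg ⟨h0r, h8r⟩ ⟨h0c, h8c⟩]
        rw [hcells, hmain.1]
        simp only [hr1', Bool.false_eq_true, if_false, hr2, hrestore]
        rw [← hcells]
        exact ihc g hg hrows hcols h0r h8r h0c h8c hzero hrest hf
    · rw [if_neg hcp, if_neg (by rw [← hbridge]; exact hcp)]
      exact ihc g hg hrows hcols h0r h8r h0c h8c hzero hrest hf

theorem solveEq_all (fuel : Nat) : SolveEq fuel := by
  induction fuel with
  | zero =>
    intro g rows cols row col _ _ _ _ _ _ _ _ hf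
    exact absurd hf (Nat.not_lt_zero _)
  | succ f ih =>
    intro g rows cols row col hg hrows hcols h0r h8r h0c h8c hidx hf
    simp only [solveA]
    by_cases e1 : row = 8
    · subst e1
      have hc0 : col = 0 := by omega
      subst hc0
      norm_num
      rw [show (64 : Int).toNat = 64 by rfl]
      simp [eCells, searchB]
    · have e1' : (row == 8) = false := by simp [e1]
      rw [e1']
      simp only [Bool.false_eq_true, if_false]
      by_cases e2 : col = 8
      · subst e2
        have e2' : ((8 : Int) == 8) = true := by simp
        rw [e2']
        simp only [if_true]
        have harg : (row * 8 + 8 : Int) = (row + 1) * 8 + 0 := by ring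
        rw [harg]
        exact ih g rows cols (row+1) 0 hg hrows hcols (by omega) (by omega) (by omega)
          (by omega) (by nlinarith) (by omega)
      · have e2' : (col == 8) = false := by simp [e2]
        rw [e2']
        simp only [Bool.false_eq_true, if_false]
        have hcollt : col < 8 := by omega
        have hidxlt : (row * 8 + col).toNat ≤ 63 := by
          omega
        have hsplit : 64 - (row * 8 + col).toNat = (64 - (row * 8 + col).toNat - 1) + 1 := by
          omega
        have hcr : (((row * 8 + col).toNat / 8 : Nat) : Int) = row := by
          have h1 : (row * 8 + col).toNat = row.toNat * 8 + col.toNat := by omega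
          omega
        have hcc : (((row * 8 + col).toNat % 8 : Nat) : Int) = col := by
          have h1 : (row * 8 + col).toNat = row.toNat * 8 + col.toNat := by omega
          omega
        rw [hsplit]
        simp only [eCells, hcr, hcc]
        by_cases e3 : pvCell g row col = 0
        · have e3' : (pvCell g row col != 0) = false := by simp [e3]
          rw [e3', if_pos e3]
          simp only [Bool.false_eq_true, if_false, searchB]
          exact loopEq f ih rows cols row col (PySem.List.pyRange 1 9) g hg hrows hcols
            h0r (by omega) h0c hcollt e3
            (by intro n hn; have := PySem.List.mem_pyRange_one.mp hn; omega)
            (by omega)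
        · have e3' : (pvCell g row col != 0) = true := by simp [e3]
          rw [e3', if_neg e3]
          simp only [if_true]
          have hmain := ih g rows cols row (col+1) hg hrows hcols h0r (by omega) (by omega)
            (by omega) (by omega) (by omega)
          rw [show (row * 8 + (col + 1)).toNat = (row * 8 + col).toNat + 1 by omega,
            show 64 - ((row * 8 + col).toNat + 1) = 64 - (row * 8 + col).toNat - 1 by omega] at hmain
          exact hmain

lemma loopGA_eq (fuel : Nat) (row col : Int) (cand : List Int) :
    ∀ g, loopGA fuel g row col cand = (loopA fuel g row col cand).2 := by
  induction cand with
  | nil => intro g; simp [loopGA, loopA]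
  | cons num rest ih =>
    intro g
    simp only [loopGA, loopA]
    by_cases hcp : can_place g row col num = true
    · rw [if_pos hcp, if_pos hcp]
      by_cases hr : (solveA fuel (pvSetCell g row col num) row (col+1)).1 = true
      · simp [hr]
      · have hr' : (solveA fuel (pvSetCell g row col num) row (col+1)).1 = false := by
          simpa using hr
        simp only [hr', if_false, Bool.false_eq_true]
        rw [ih]
    · rw [if_neg hcp, if_neg hcp]
      exact ih g

lemma solvGA_eq (fuel : Nat) : ∀ (g : List (List Int)) (row col : Int),
    solvGA fuel g row col = (solveA fuel g row col).2 := by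
  induction fuel with
  | zero => intro g row col; simp [solvGA, solveA]
  | succ f ih =>
    intro g row col
    simp only [solvGA, solveA]
    by_cases e1 : (row == 8) = true
    · simp [e1]
    · have e1' : (row == 8) = false := by simpa using e1
      rw [e1']
      by_cases e2 : (col == 8) = true
      · simp only [e2, if_true]
        exact ih g (row+1) 0
      · have e2' : (col == 8) = false := by simpa using e2
        rw [e2']
        by_cases e3 : (pvCell g row col != 0) = true
        · simp only [e3, if_true]
          exact ih g row (col+1)
        · have e3' : (pvCell g row col != 0) = false := by simpa using e3
          rw [e3']
          simp only [Bool.false_eq_true, if_false]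
          exact loopGA_eq f row col _ g

lemma solvGA_row8 (fuel : Nat) (g : List (List Int)) (col : Int) :
    solvGA fuel g 8 col = g := by
  cases fuel with
  | zero => simp [solvGA]
  | succ f => simp [solvGA]

-- ===== VERDICT (by name: the statement is the Claim_ definition above) =====
theorem solvable_grid_spec : Claim_equal_solvable_grid := by
  intro grid row col _ hpre
  unfold Spec_solvable_grid
  rcases hpre with h8 | ⟨hlen, hall, h0r, h8r, h0c, h8c⟩
  · subst h8
    unfold solvable_grid solvable_grid_alt
    rw [solvGA_row8]
    simp
  · have hg : ShapeG grid := ⟨hlen, hall⟩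
    have hidx : 0 ≤ row * 8 + col ∧ row * 8 + col ≤ 64 := by constructor <;> nlinarith
    have hmain := solveEq_all 200 grid (pvRowSets grid) (pvColSets grid) row col hg
      (rowsOK_init grid hg) (colsOK_init grid hg) h0r (by omega) h0c h8c hidx.2 (by omega)
    have hcells := cells_eq grid (64 - (row * 8 + col).toNat) (row * 8 + col).toNat (by omega)
    have hstart : ((row * 8 + col).toNat : Int) = row * 8 + col := by omega
    rw [hstart] at hcells
    unfold solvable_grid solvable_grid_alt
    rw [solvGA_eq 200 grid row col, if_neg (by simp; omega)]
    simp only [hcells, hmain.1]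
    by_cases hr : (solveA 200 grid row col).1 = true
    · simp [hr]
    · have hr' : (solveA 200 grid row col).1 = false := by simpa using hr
      have := hmain.2 hr'
      simp [hr', this]
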